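-- pv_equiv track=rewrite | github.com/huntfx/MouseTracks | mousetracks2/legacy/colours.py | hex_to_colour
-- ===== SOURCE A (Python) =====
-- def hex_to_colour(value: str) -> tuple[int, list[int] | None]:
--     """Convert a hex string to colour.
--     Supports inputs as #RGB, #RGBA, #RRGGBB and #RRGGBBAA.
--     If a longer string is invalid, it will try lower lengths.
--     """
--     if value.startswith('#'):
--         value = value[1:]
--     value_len = len(value)
--     if value_len >= 8:
--         try:
--             return (8, [int(value[i*2:i*2+2], 16) for i in range(4)])
--         except ValueError:
--             return hex_to_colour(value[:6])
--     elif value_len >= 6: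
--         try:
--             return (6, [int(value[i*2:i*2+2], 16) for i in range(3)] + [255])
--         except ValueError:
--             return hex_to_colour(value[:4])
--     elif value_len >= 4:
--         try:
--             return (3, [16*j+j for j in (int(value[i:i+1], 16) for i in range(4))])
--         except ValueError:
--             return hex_to_colour(value[:3])
--     elif value_len >= 3:
--         try:
--             return (3, [16*j+j for j in (int(value[i:i+1], 16) for i in range(3))] + [255])
--         except ValueError:
--             pass
--     return (0, None)
-- ===== SOURCE B (Python) =====
-- _SPECS = [(8, 2, 4, 8, False, 6), (6, 2, 3, 6, True, 4),
--           (4, 1, 4, 3, False, 3), (3, 1, 3, 3, True, 0)]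
--
--
-- def hex_to_colour(value):
--     """Convert a hex string to colour, driven by a table of format specs."""
--     while True:
--         if value.startswith('#'):
--             value = value[1:]
--         spec = next((s for s in _SPECS if len(value) >= s[0]), None)
--         if spec is None:
--             return (0, None)
--         _min_len, chunk, groups, code, alpha, trunc = spec
--         try:
--             parts = [int(value[i * chunk:(i + 1) * chunk], 16) for i in range(groups)]
--         except ValueError:
--             if not trunc:
--                 return (0, None)
--             value = value[:trunc]
--             continue
--         if chunk == 1:
--             parts = [16 * j + j for j in parts]
--         if alpha:
--             parts.append(255)
--         return (code, parts)
-- ===== Notes on version B (the rewrite author's own statement) =====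
-- stated objective: alternative
-- what changed: A's recursive if/elif cascade with per-branch try/except fallbacks is replaced by a single loop over a table of format specs (min_len, chunk, groups, code, alpha, trunc): the first spec fitting the length is parsed generically and a failed parse truncates the value and restarts the loop.
import Mathlib
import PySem

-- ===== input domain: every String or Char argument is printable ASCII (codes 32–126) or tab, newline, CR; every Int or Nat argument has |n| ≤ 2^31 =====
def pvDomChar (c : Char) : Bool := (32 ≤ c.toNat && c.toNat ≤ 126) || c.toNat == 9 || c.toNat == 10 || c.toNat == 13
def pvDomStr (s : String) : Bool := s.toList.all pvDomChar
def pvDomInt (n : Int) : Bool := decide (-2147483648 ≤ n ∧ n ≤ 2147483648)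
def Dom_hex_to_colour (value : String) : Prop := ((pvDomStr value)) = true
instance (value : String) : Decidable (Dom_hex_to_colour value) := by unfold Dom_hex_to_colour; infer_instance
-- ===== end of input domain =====

-- B replaces A's recursive if/elif cascade by one loop over a table of format specs
-- (min_len, chunk, groups, code, alpha, trunc); same return value everywhere (objective: alternative decomposition).
-- Both ports carry a fuel argument only as a totality guard (fuel = length + 1 always suffices:
-- every retry strictly shortens the value).

-- value = value[1:] if value.startswith('#') (shared by both ports)
def stripHash (cs : List Char) : List Char :=
  if PySem.Chars.startswith cs ['#'] then PySem.List.slice cs (some 1) none else cs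

-- ===== PORT A =====
-- [int(value[i*2:i*2+2], 16) for i in range(n)]  (none = ValueError somewhere)
def hexPairsA (cs : List Char) (n : Int) : Option (List Int) :=
  (PySem.List.pyRange 0 n 1).mapM
    (fun i => PySem.Int.ofCharsBase? (PySem.List.slice cs (some (i * 2)) (some (i * 2 + 2))) 16)

-- int(value[i:i+1], 16) for i in range(n)
def hexNibblesA (cs : List Char) (n : Int) : Option (List Int) :=
  (PySem.List.pyRange 0 n 1).mapM
    (fun i => PySem.Int.ofCharsBase? (PySem.List.slice cs (some i) (some (i + 1))) 16)

def hexAF : Nat → List Char → Int × Option (List Int)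
  | 0, _ => (0, none)  -- never reached with fuel = length + 1
  | fuel + 1, cs =>
    if 8 ≤ (stripHash cs).length then
      match hexPairsA (stripHash cs) 4 with
      | some parts => (8, some parts)
      | none => hexAF fuel (PySem.List.slice (stripHash cs) none (some 6))
    else if 6 ≤ (stripHash cs).length then
      match hexPairsA (stripHash cs) 3 with
      | some parts => (6, some (parts ++ [255]))
      | none => hexAF fuel (PySem.List.slice (stripHash cs) none (some 4))
    else if 4 ≤ (stripHash cs).length then
      match hexNibblesA (stripHash cs) 4 with
      | some parts => (3, some (parts.map (fun j => 16 * j + j)))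
      | none => hexAF fuel (PySem.List.slice (stripHash cs) none (some 3))
    else if 3 ≤ (stripHash cs).length then
      match hexNibblesA (stripHash cs) 3 with
      | some parts => (3, some (parts.map (fun j => 16 * j + j) ++ [255]))
      | none => (0, none)
    else (0, none)

def hex_to_colour (value : String) : Int × Option (List Int) :=
  hexAF (value.toList.length + 1) value.toList

-- ===== PORT B =====
-- table of specs: (min_len, chunk, groups, code, alpha, trunc); trunc = 0 means "give up"
def hexSpecs : List (Int × Int × Int × Int × Bool × Int) :=
  [(8, 2, 4, 8, false, 6), (6, 2, 3, 6, true, 4), (4, 1, 4, 3, false, 3), (3, 1, 3, 3, true, 0)]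

-- [int(value[i*chunk:(i+1)*chunk], 16) for i in range(groups)]  (none = ValueError somewhere)
def hexChunksB (cs : List Char) (chunk groups : Int) : Option (List Int) :=
  (PySem.List.pyRange 0 groups 1).mapM
    (fun i => PySem.Int.ofCharsBase? (PySem.List.slice cs (some (i * chunk)) (some ((i + 1) * chunk))) 16)

def hexBF : Nat → List Char → Int × Option (List Int)
  | 0, _ => (0, none)  -- never reached with fuel = length + 1
  | fuel + 1, cs =>
    match hexSpecs.find? (fun s => decide (s.1 ≤ ((stripHash cs).length : Int))) with
    | none => (0, none)
    | some (_minLen, chunk, groups, code, alpha, trunc) =>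
      match hexChunksB (stripHash cs) chunk groups with
      | some parts =>
        let parts := if chunk == 1 then parts.map (fun j => 16 * j + j) else parts
        let parts := if alpha then parts ++ [255] else parts
        (code, some parts)
      | none =>
        if trunc == 0 then (0, none)
        else hexBF fuel (PySem.List.slice (stripHash cs) none (some trunc))

def hex_to_colour_alt (value : String) : Int × Option (List Int) :=
  hexBF (value.toList.length + 1) value.toList

-- ===== PRECONDITION & SPEC =====
def Spec_hex_to_colour (value : String) (out : Int × Option (List Int)) : Prop := out = hex_to_colour_alt value
instance (value : String) (out : Int × Option (List Int)) : Decidable (Spec_hex_to_colour value out) := by unfold Spec_hex_to_colour; infer_instance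

-- ===== CLAIM (what is proved, stated in full; the proofs are below) =====
def Claim_equal_hex_to_colour : Prop := ∀ (value : String), Dom_hex_to_colour value → Spec_hex_to_colour value (hex_to_colour value)

-- ===== LEMMAS AND PROOFS =====

theorem stripHash_length (cs : List Char) : (stripHash cs).length ≤ cs.length := by
  unfold stripHash
  split
  · rw [PySem.List.slice_from _ (by norm_num : (0 : Int) ≤ 1)]
    simp
  · exact Nat.le_refl _

theorem chunksB_pairs4 (d : List Char) : hexChunksB d 2 4 = hexPairsA d 4 := by
  unfold hexChunksB hexPairsA
  rw [show PySem.List.pyRange 0 4 1 = [0, 1, 2, 3] from by decide]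
  norm_num [List.mapM_cons, List.mapM_nil]

theorem chunksB_pairs3 (d : List Char) : hexChunksB d 2 3 = hexPairsA d 3 := by
  unfold hexChunksB hexPairsA
  rw [show PySem.List.pyRange 0 3 1 = [0, 1, 2] from by decide]
  norm_num [List.mapM_cons, List.mapM_nil]

theorem chunksB_nib4 (d : List Char) : hexChunksB d 1 4 = hexNibblesA d 4 := by
  unfold hexChunksB hexNibblesA
  rw [show PySem.List.pyRange 0 4 1 = [0, 1, 2, 3] from by decide]
  norm_num [List.mapM_cons, List.mapM_nil]

theorem chunksB_nib3 (d : List Char) : hexChunksB d 1 3 = hexNibblesA d 3 := by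
  unfold hexChunksB hexNibblesA
  rw [show PySem.List.pyRange 0 3 1 = [0, 1, 2] from by decide]
  norm_num [List.mapM_cons, List.mapM_nil]

theorem slice_len_le (d : List Char) (k : Int) (hk : 0 ≤ k) :
    (PySem.List.slice d none (some k)).length ≤ k.toNat := by
  rw [PySem.List.slice_to _ hk]
  simp

theorem hexAF_eq_hexBF : ∀ (fa fb : Nat) (cs : List Char),
    cs.length < fa → cs.length < fb → hexAF fa cs = hexBF fb cs := by
  intro fa
  induction fa with
  | zero => intro fb cs h _; omega
  | succ n IH =>
    intro fb cs hA hB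
    cases fb with
    | zero => omega
    | succ m =>
      have hstrip := stripHash_length cs
      by_cases h8 : 8 ≤ (stripHash cs).length
      · have hf : hexSpecs.find? (fun s => decide (s.1 ≤ ((stripHash cs).length : Int)))
            = some (8, 2, 4, 8, false, 6) := by
          simp only [hexSpecs]
          rw [List.find?_cons_of_pos (by simp; omega)]
        simp only [hexBF]
        split
        · rename_i heq; rw [hf] at heq; cases heq
        · rename_i heq
          rw [hf] at heq
          simp only [Option.some.injEq, Prod.mk.injEq] at heq
          obtain ⟨rfl, rfl, rfl, rfl, rfl, rfl⟩ := heq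
          simp only [hexAF]
          rw [if_pos h8, chunksB_pairs4]
          cases hP : hexPairsA (stripHash cs) 4 with
          | some parts => simp
          | none =>
            have hsl := slice_len_le (stripHash cs) 6 (by norm_num)
            rw [if_neg (by decide)]
            exact IH m _ (by omega) (by omega)
      · by_cases h6 : 6 ≤ (stripHash cs).length
        · have hf : hexSpecs.find? (fun s => decide (s.1 ≤ ((stripHash cs).length : Int)))
              = some (6, 2, 3, 6, true, 4) := by
            simp only [hexSpecs]
            rw [List.find?_cons_of_neg (by simp; omega),
                List.find?_cons_of_pos (by simp; omega)]
          simp only [hexBF]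
          split
          · rename_i heq; rw [hf] at heq; cases heq
          · rename_i heq
            rw [hf] at heq
            simp only [Option.some.injEq, Prod.mk.injEq] at heq
            obtain ⟨rfl, rfl, rfl, rfl, rfl, rfl⟩ := heq
            simp only [hexAF]
            rw [if_neg h8, if_pos h6, chunksB_pairs3]
            cases hP : hexPairsA (stripHash cs) 3 with
            | some parts => simp
            | none =>
              have hsl := slice_len_le (stripHash cs) 4 (by norm_num)
              rw [if_neg (by decide)]
              exact IH m _ (by omega) (by omega)
        · by_cases h4 : 4 ≤ (stripHash cs).length
          · have hf : hexSpecs.find? (fun s => decide (s.1 ≤ ((stripHash cs).length : Int)))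
                = some (4, 1, 4, 3, false, 3) := by
              simp only [hexSpecs]
              rw [List.find?_cons_of_neg (by simp; omega),
                  List.find?_cons_of_neg (by simp; omega),
                  List.find?_cons_of_pos (by simp; omega)]
            simp only [hexBF]
            split
            · rename_i heq; rw [hf] at heq; cases heq
            · rename_i heq
              rw [hf] at heq
              simp only [Option.some.injEq, Prod.mk.injEq] at heq
              obtain ⟨rfl, rfl, rfl, rfl, rfl, rfl⟩ := heq
              simp only [hexAF]
              rw [if_neg h8, if_neg h6, if_pos h4, chunksB_nib4]
              cases hP : hexNibblesA (stripHash cs) 4 with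
              | some parts => simp
              | none =>
                have hsl := slice_len_le (stripHash cs) 3 (by norm_num)
                rw [if_neg (by decide)]
                exact IH m _ (by omega) (by omega)
          · by_cases h3 : 3 ≤ (stripHash cs).length
            · have hf : hexSpecs.find? (fun s => decide (s.1 ≤ ((stripHash cs).length : Int)))
                  = some (3, 1, 3, 3, true, 0) := by
                simp only [hexSpecs]
                rw [List.find?_cons_of_neg (by simp; omega),
                    List.find?_cons_of_neg (by simp; omega),
                    List.find?_cons_of_neg (by simp; omega),
                    List.find?_cons_of_pos (by simp; omega)]
              simp only [hexBF]
              split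
              · rename_i heq; rw [hf] at heq; cases heq
              · rename_i heq
                rw [hf] at heq
                simp only [Option.some.injEq, Prod.mk.injEq] at heq
                obtain ⟨rfl, rfl, rfl, rfl, rfl, rfl⟩ := heq
                simp only [hexAF]
                rw [if_neg h8, if_neg h6, if_neg h4, if_pos h3, chunksB_nib3]
                cases hP : hexNibblesA (stripHash cs) 3 with
                | some parts => simp
                | none => simp
            · have hf : hexSpecs.find? (fun s => decide (s.1 ≤ ((stripHash cs).length : Int)))
                  = none := by
                apply List.find?_eq_none.mpr
                intro x hx
                simp only [hexSpecs, List.mem_cons, List.not_mem_nil, or_false] at hx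
                rcases hx with rfl | rfl | rfl | rfl <;> simp <;> omega
              simp only [hexBF]
              split
              · simp only [hexAF]
                rw [if_neg h8, if_neg h6, if_neg h4, if_neg h3]
              · rename_i heq; rw [hf] at heq; cases heq

-- ===== VERDICT (by name: the statement is the Claim_ definition above) =====
theorem hex_to_colour_spec : Claim_equal_hex_to_colour := by
  intro value _
  unfold Spec_hex_to_colour hex_to_colour hex_to_colour_alt
  exact hexAF_eq_hexBF _ _ value.toList (by omega) (by omega)
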